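-- pv_equiv track=rewrite | github.com/hyeon-gyu/CodingTest | 프로그래머스/1/134240. 푸드 파이트 대회/푸드 파이트 대회.py | solution
-- ===== SOURCE A (Python) =====
-- from collections import deque
--
-- def solution(food):
--     answer = ""
--     queue = deque([0])
--     for i in range(len(food)-1, -1, -1):
--         k = food[i] // 2
--         for _ in range(k):
--             queue.appendleft(i)
--             queue.append(i)
--
--     for i in queue:
--         answer += str(i)
--     return answer
-- ===== SOURCE B (Python) =====
-- def solution(food):
--     half = [i for i in range(len(food)) for _ in range(food[i] // 2)]
--     return ''.join(map(str, half + [0] + half[::-1]))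
-- ===== Notes on version B (the rewrite author's own statement) =====
-- stated objective: simpler
-- what changed: Replaces the deque with simultaneous two-ended appends inside a reversed index loop by a single forward comprehension building only the left half, then mirrors it around the fixed center 0 (half + [0] + reversed half).
import Mathlib
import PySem

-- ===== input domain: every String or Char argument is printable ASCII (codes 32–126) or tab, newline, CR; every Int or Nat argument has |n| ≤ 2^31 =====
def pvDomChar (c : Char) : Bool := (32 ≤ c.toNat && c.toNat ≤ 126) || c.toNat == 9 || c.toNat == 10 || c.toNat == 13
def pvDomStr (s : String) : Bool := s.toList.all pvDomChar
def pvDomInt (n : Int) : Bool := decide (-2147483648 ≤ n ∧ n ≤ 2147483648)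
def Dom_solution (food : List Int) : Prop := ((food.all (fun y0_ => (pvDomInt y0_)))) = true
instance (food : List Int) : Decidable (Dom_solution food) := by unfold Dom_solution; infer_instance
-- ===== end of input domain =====

-- B builds only the left half in one forward pass and mirrors it around the centre 0,
-- replacing A's deque with simultaneous two-ended appends (objective: simpler).

-- ===== PORT A =====
def solution (food : List Int) : String :=
  let queue : List Int := [0]
  let queue := (PySem.List.pyRange ((food.length : Int) - 1) (-1) (-1)).foldl
    (fun q i =>
      let k := PySem.Int.floordiv (PySem.List.pyGetD food i 0) 2
      (PySem.List.pyRange 0 k 1).foldl (fun q _ => i :: (q ++ [i])) q) queue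
  queue.foldl (fun answer i => answer ++ PySem.Int.toStr i) ""

-- ===== PORT B =====
def solution_alt (food : List Int) : String :=
  let half : List Int := (PySem.List.pyRange 0 (food.length : Int) 1).flatMap
    (fun i => List.replicate (PySem.Int.floordiv (PySem.List.pyGetD food i 0) 2).toNat i)
  PySem.Str.join "" ((half ++ [0] ++ half.reverse).map PySem.Int.toStr)

-- ===== PRECONDITION & SPEC =====
def Spec_solution (food : List Int) (out : String) : Prop := out = solution_alt food
instance (food : List Int) (out : String) : Decidable (Spec_solution food out) := by unfold Spec_solution; infer_instance

-- ===== CLAIM (what is proved, stated in full; the proofs are below) =====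
def Claim_equal_solution : Prop := ∀ (food : List Int), Dom_solution food → Spec_solution food (solution food)

-- ===== LEMMAS AND PROOFS =====

theorem pv_replicate_append_cons {α : Type} (n : Nat) (a : α) (xs : List α) :
    List.replicate n a ++ a :: xs = a :: (List.replicate n a ++ xs) := by
  induction n with
  | zero => simp
  | succ m ih => simp [List.replicate_succ, ih]

-- the inner 'for _ in range(k)' double-append loop, over an arbitrary carrier list
theorem pv_inner_aux {α : Type} (i : Int) (l : List α) : ∀ (q : List Int),
    l.foldl (fun q _ => i :: (q ++ [i])) q
      = List.replicate l.length i ++ q ++ List.replicate l.length i := by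
  induction l with
  | nil => intro q; simp
  | cons x xs ih =>
      intro q
      simp only [List.foldl_cons, ih, List.length_cons, List.replicate_succ]
      simp [pv_replicate_append_cons, List.append_assoc]

theorem pv_inner (i k : Int) (q : List Int) :
    (PySem.List.pyRange 0 k 1).foldl (fun q _ => i :: (q ++ [i])) q
      = List.replicate k.toNat i ++ q ++ List.replicate k.toNat i := by
  rw [pv_inner_aux i (PySem.List.pyRange 0 k 1) q, PySem.List.length_pyRange_one]
  norm_num

-- the outer loop: the queue after folding index list l
theorem pv_outer (food : List Int) (l : List Int) : ∀ (q : List Int),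
    l.foldl (fun q i =>
        (PySem.List.pyRange 0 (PySem.Int.floordiv (PySem.List.pyGetD food i 0) 2) 1).foldl
          (fun q _ => i :: (q ++ [i])) q) q
      = l.reverse.flatMap (fun i => List.replicate (PySem.Int.floordiv (PySem.List.pyGetD food i 0) 2).toNat i)
        ++ q
        ++ l.flatMap (fun i => List.replicate (PySem.Int.floordiv (PySem.List.pyGetD food i 0) 2).toNat i) := by
  induction l with
  | nil => intro q; simp
  | cons x xs ih =>
      intro q
      rw [List.foldl_cons, pv_inner, ih]
      simp [List.append_assoc]

-- A's trailing 'answer += str(i)' loop equals join of the mapped list, at the character level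
theorem pv_fold_toList (l : List Int) : ∀ (s : String),
    (l.foldl (fun answer i => answer ++ PySem.Int.toStr i) s).toList
      = s.toList ++ (l.map (fun i => (PySem.Int.toStr i).toList)).flatten := by
  induction l with
  | nil => intro s; simp
  | cons x xs ih => intro s; simp [ih]

theorem pv_join_empty_sep (ps : List (List Char)) :
    PySem.Chars.join [] ps = ps.flatten := by
  induction ps with
  | nil => simp [PySem.Chars.join_nil]
  | cons p rest ih =>
      cases rest with
      | nil => simp [PySem.Chars.join_singleton]
      | cons q r => rw [PySem.Chars.join_cons_cons]; simp [ih]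

-- ===== VERDICT (by name: the statement is the Claim_ definition above) =====
theorem solution_spec : Claim_equal_solution := by
  intro food _
  unfold Spec_solution solution solution_alt
  dsimp only
  set rep : Int → List Int :=
    fun i => List.replicate (PySem.Int.floordiv (PySem.List.pyGetD food i 0) 2).toNat i with hrep
  have hrange : PySem.List.pyRange ((food.length : Int) - 1) (-1) (-1)
      = (PySem.List.pyRange 0 (food.length : Int) 1).reverse := by
    rw [PySem.List.pyRange_neg_one_eq_reverse]; norm_num
  rw [pv_outer, hrange, List.reverse_reverse]
  have hrev : ((PySem.List.pyRange 0 (food.length : Int) 1).flatMap rep).reverse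
      = (PySem.List.pyRange 0 (food.length : Int) 1).reverse.flatMap rep := by
    rw [List.reverse_flatMap]
    simp [hrep, Function.comp_def]
  rw [← hrev]
  apply String.toList_injective
  rw [pv_fold_toList, PySem.Str.toList_join]
  simp [pv_join_empty_sep, List.map_map, Function.comp_def, PySem.Int.toList_toStr, hrep]
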